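-- pv_equiv track=rewrite | github.com/ADScanPro/adscan | adscan_internal/cli/rodc_escalation.py | _parse_bloodyad_multi_value_output
-- ===== SOURCE A (Python) =====
-- from typing import Any, Iterable
--
-- def _normalize_attr_values(values: Iterable[str]) -> tuple[str, ...]:
--     """Return trimmed multi-valued LDAP attribute values preserving order."""
--     normalized: list[str] = []
--     seen: set[str] = set()
--     for raw_value in values:
--         value = str(raw_value or "").strip()
--         key = value.casefold()
--         if not value or key in seen:
--             continue
--         seen.add(key)
--         normalized.append(value)
--     return tuple(normalized)
--
-- def _parse_bloodyad_multi_value_output(output: str) -> dict[str, tuple[str, ...]]: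
--     """Parse repeated ``key: value`` BloodyAD output lines into tuples."""
--     values: dict[str, list[str]] = {}
--     for raw_line in str(output or "").splitlines():
--         line = str(raw_line or "").strip()
--         if not line or ":" not in line:
--             continue
--         key, value = line.split(":", 1)
--         key_clean = key.strip()
--         value_clean = value.strip()
--         if not key_clean or not value_clean:
--             continue
--         values.setdefault(key_clean, []).append(value_clean)
--     return {
--         key: _normalize_attr_values(raw_values) for key, raw_values in values.items()
--     }
-- ===== SOURCE B (Python) =====
-- def _parse_bloodyad_multi_value_output(output: str) -> dict[str, tuple[str, ...]]:
--     """Parse repeated ``key: value`` BloodyAD output lines into tuples.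
--
--     Single pass: deduplicate values (casefold-insensitively, keeping the first
--     occurrence) while parsing, instead of grouping raw values and rescanning.
--     """
--     result: dict[str, list[str]] = {}
--     seen: dict[str, set[str]] = {}
--     for raw_line in str(output or "").splitlines():
--         line = str(raw_line or "").strip()
--         if not line or ":" not in line:
--             continue
--         key, value = line.split(":", 1)
--         key_clean = key.strip()
--         value_clean = value.strip()
--         if not key_clean or not value_clean:
--             continue
--         fold = value_clean.casefold()
--         bucket = seen.get(key_clean, set())
--         if fold in bucket:
--             continue
--         bucket.add(fold)
--         seen[key_clean] = bucket
--         result.setdefault(key_clean, []).append(value_clean)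
--     return {key: tuple(vals) for key, vals in result.items()}
-- ===== Notes on version B (the rewrite author's own statement) =====
-- stated objective: alternative
-- what changed: A groups raw values per key into lists and then rescans each group with a separate normalization pass; B deduplicates (casefold-insensitively) in a single pass while parsing, maintaining a per-key seen-set dict, so the per-key raw lists and the second pass disappear.
import Mathlib
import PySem

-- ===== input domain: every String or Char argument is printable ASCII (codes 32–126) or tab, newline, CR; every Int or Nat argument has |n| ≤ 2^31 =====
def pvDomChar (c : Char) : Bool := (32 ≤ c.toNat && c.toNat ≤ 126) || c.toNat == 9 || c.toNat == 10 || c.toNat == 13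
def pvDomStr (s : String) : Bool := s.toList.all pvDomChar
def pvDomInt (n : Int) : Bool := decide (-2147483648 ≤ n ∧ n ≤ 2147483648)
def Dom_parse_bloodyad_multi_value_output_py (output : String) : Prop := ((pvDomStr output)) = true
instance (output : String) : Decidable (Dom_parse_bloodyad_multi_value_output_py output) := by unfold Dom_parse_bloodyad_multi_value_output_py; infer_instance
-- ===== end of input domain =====

-- B folds A's two phases (group raw values per key, then rescan each group to
-- deduplicate) into one pass that deduplicates while parsing; same results,
-- different decomposition (objective: alternative).

-- ===== PORT A =====
-- str.casefold is ported as PySem.Str.lower: exact on the ASCII input domain.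
def pvNormalizeAttrValues (values : List String) : List String :=
  ((values.foldl (fun (st : List String × PySem.Set String) raw_value =>
      let value := PySem.Str.strip raw_value        -- str(raw_value or "").strip(): 'or ""' is the identity on str
      let key := PySem.Str.lower value
      if value == "" || PySem.Set.contains st.2 key then st
      else (st.1 ++ [value], PySem.Set.add st.2 key))
    ([], PySem.Set.empty))).1

def parse_bloodyad_multi_value_output_py (output : String) : List (String × List String) :=
  let values := (PySem.Str.splitlines output).foldl
    (fun (d : PySem.Dict String (List String)) raw_line =>
      let line := PySem.Str.strip raw_line          -- str(raw_line or "").strip()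
      if line == "" || !(PySem.Str.isIn ":" line) then d
      else
        match PySem.Str.splitMax? line ":" 1 with   -- line.split(":", 1); always two parts since ":" ∈ line
        | some [key, value] =>
          let key_clean := PySem.Str.strip key
          let value_clean := PySem.Str.strip value
          if key_clean == "" || value_clean == "" then d
          else d.modify key_clean [] (fun vs => vs ++ [value_clean])  -- values.setdefault(k, []).append(v)
        | _ => d)
    PySem.Dict.empty
  values.items.map (fun kv => (kv.1, pvNormalizeAttrValues kv.2))

-- ===== PORT B =====
def parse_bloodyad_multi_value_output_py_alt (output : String) : List (String × List String) :=
  let st := (PySem.Str.splitlines output).foldl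
    (fun (st : PySem.Dict String (List String) × PySem.Dict String (PySem.Set String)) raw_line =>
      let line := PySem.Str.strip raw_line
      if line == "" || !(PySem.Str.isIn ":" line) then st
      else
        -- key, value = line.split(":", 1): with ":" ∈ line this is exactly a two-element list
        match PySem.Str.splitMax? line ":" 1 with
        | none => st
        | some [] => st
        | some [_] => st
        | some [key, value] =>
          let key_clean := PySem.Str.strip key
          let value_clean := PySem.Str.strip value
          if key_clean == "" || value_clean == "" then st
          else
            let fold := PySem.Str.lower value_clean          -- value_clean.casefold(): lower is exact on ASCII
            let bucket := st.2.getD key_clean PySem.Set.empty -- seen.get(key_clean, set())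
            if PySem.Set.contains bucket fold then st
            else (st.1.modify key_clean [] (fun vs => vs ++ [value_clean]),
                  st.2.insert key_clean (PySem.Set.add bucket fold))
        | some (_ :: _ :: _ :: _) => st)
    (PySem.Dict.empty, PySem.Dict.empty)
  st.1.items                                         -- {k: tuple(v) ...}: tuple() is the identity here

-- ===== PRECONDITION & SPEC =====
def Spec_parse_bloodyad_multi_value_output_py (output : String) (out : List (String × List String)) : Prop := out = parse_bloodyad_multi_value_output_py_alt output
instance (output : String) (out : List (String × List String)) : Decidable (Spec_parse_bloodyad_multi_value_output_py output out) := by unfold Spec_parse_bloodyad_multi_value_output_py; infer_instance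

-- ===== CLAIM (what is proved, stated in full; the proofs are below) =====
def Claim_equal_parse_bloodyad_multi_value_output_py : Prop := ∀ (output : String), Dom_parse_bloodyad_multi_value_output_py output → Spec_parse_bloodyad_multi_value_output_py output (parse_bloodyad_multi_value_output_py output)

-- ===== LEMMAS AND PROOFS =====

-- the shared per-line parser both loops transliterate
def pvParseLine (raw_line : String) : Option (String × String) :=
  let line := PySem.Str.strip raw_line
  if line == "" || !(PySem.Str.isIn ":" line) then none
  else
    match PySem.Str.splitMax? line ":" 1 with
    | some [key, value] =>
      let key_clean := PySem.Str.strip key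
      let value_clean := PySem.Str.strip value
      if key_clean == "" || value_clean == "" then none
      else some (key_clean, value_clean)
    | _ => none

-- dedup-by-lowercase of a list of (already stripped, non-empty) values, with its seen set
def pvDedup (vs : List String) : List String × PySem.Set String :=
  vs.foldl (fun st v =>
    let f := PySem.Str.lower v
    if PySem.Set.contains st.2 f then st else (st.1 ++ [v], PySem.Set.add st.2 f))
    ([], PySem.Set.empty)

def pvStepA (d : PySem.Dict String (List String)) (p : String × String) : PySem.Dict String (List String) :=
  d.modify p.1 [] (fun vs => vs ++ [p.2])

def pvStepB (st : PySem.Dict String (List String) × PySem.Dict String (PySem.Set String))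
    (p : String × String) : PySem.Dict String (List String) × PySem.Dict String (PySem.Set String) :=
  let fold := PySem.Str.lower p.2
  let bucket := st.2.getD p.1 PySem.Set.empty
  if PySem.Set.contains bucket fold then st
  else (st.1.modify p.1 [] (fun vs => vs ++ [p.2]), st.2.insert p.1 (PySem.Set.add bucket fold))

lemma pvA_fold_eq (output : String) :
    parse_bloodyad_multi_value_output_py output =
      (((PySem.Str.splitlines output).filterMap pvParseLine).foldl pvStepA PySem.Dict.empty).items.map
        (fun kv => (kv.1, pvNormalizeAttrValues kv.2)) := by
  unfold parse_bloodyad_multi_value_output_py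
  dsimp only
  rw [List.foldl_filterMap]
  congr 2
  apply PySem.List.foldl_congr_mem
  intro d raw _
  unfold pvParseLine pvStepA
  dsimp only
  split
  · rfl
  · split
    · split
      · rfl
      · rfl
    · rfl

lemma pvB_fold_eq (output : String) :
    parse_bloodyad_multi_value_output_py_alt output =
      (((PySem.Str.splitlines output).filterMap pvParseLine).foldl pvStepB (PySem.Dict.empty, PySem.Dict.empty)).1.items := by
  unfold parse_bloodyad_multi_value_output_py_alt
  dsimp only
  rw [List.foldl_filterMap]
  congr 3
  funext st raw
  unfold pvParseLine pvStepB
  dsimp only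
  split
  · rfl
  · rcases PySem.Str.splitMax? (PySem.Str.strip raw) ":" 1 with - | parts
    · rfl
    · rcases parts with - | ⟨k, - | ⟨v, - | t⟩⟩
      · rfl
      · rfl
      · simp only []
        split
        · rfl
        · rfl
      · rfl

def pvInv (dA res : PySem.Dict String (List String)) (seen : PySem.Dict String (PySem.Set String)) : Prop :=
  res.keys = dA.keys ∧ res.keys.Nodup ∧
  (∀ k, res.getD k [] = (pvDedup (dA.getD k [])).1) ∧
  (∀ k, seen.getD k PySem.Set.empty = (pvDedup (dA.getD k [])).2)

lemma pvDedup_append (vs : List String) (v : String) :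
    pvDedup (vs ++ [v]) =
      (if PySem.Set.contains (pvDedup vs).2 (PySem.Str.lower v) then pvDedup vs
       else ((pvDedup vs).1 ++ [v], PySem.Set.add (pvDedup vs).2 (PySem.Str.lower v))) := by
  simp [pvDedup, List.foldl_append]

lemma pvStep_inv (dA res : PySem.Dict String (List String)) (seen : PySem.Dict String (PySem.Set String))
    (p : String × String) (h : pvInv dA res seen) :
    pvInv (pvStepA dA p) (pvStepB (res, seen) p).1 (pvStepB (res, seen) p).2 := by
  obtain ⟨hk, hnd, hres, hseen⟩ := h
  unfold pvStepA pvStepB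
  dsimp only
  rw [hseen p.1]
  by_cases hc : PySem.Set.contains (pvDedup (dA.getD p.1 [])).2 (PySem.Str.lower p.2) = true
  · -- duplicate value: B's state is unchanged; A appends to an existing group
    rw [if_pos hc]
    have hne : dA.getD p.1 [] ≠ [] := by
      intro hnil
      rw [hnil] at hc
      simp [pvDedup, PySem.Set.empty] at hc
    have hcont : dA.contains p.1 = true := by
      by_contra hco
      exact hne (PySem.Dict.getD_of_not_contains dA [] (by simpa using hco))
    refine ⟨?_, hnd, ?_, ?_⟩
    · rw [hk, PySem.Dict.keys_modify, PySem.Dict.keys_insert_of_contains _ _ hcont]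
    · intro k
      rw [hres k, PySem.Dict.getD_modify]
      split
      · next heq => subst heq; rw [pvDedup_append, if_pos hc]
      · rfl
    · intro k
      rw [hseen k, PySem.Dict.getD_modify]
      split
      · next heq => subst heq; rw [pvDedup_append, if_pos hc]
      · rfl
  · -- new value: both sides append it
    rw [if_neg hc]
    have hcontc : res.contains p.1 = dA.contains p.1 := by
      rw [PySem.Dict.contains_eq_decide_mem_keys, PySem.Dict.contains_eq_decide_mem_keys, hk]
    refine ⟨?_, ?_, ?_, ?_⟩
    · rw [PySem.Dict.keys_modify, PySem.Dict.keys_modify]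
      by_cases hco : dA.contains p.1 = true
      · rw [PySem.Dict.keys_insert_of_contains _ _ (hcontc ▸ hco),
            PySem.Dict.keys_insert_of_contains _ _ hco, hk]
      · rw [PySem.Dict.keys_insert_of_not_contains _ _ (by simpa [hcontc] using hco),
            PySem.Dict.keys_insert_of_not_contains _ _ (by simpa using hco), hk]
    · rw [PySem.Dict.keys_modify]
      by_cases hco : res.contains p.1 = true
      · rw [PySem.Dict.keys_insert_of_contains _ _ hco]; exact hnd
      · rw [PySem.Dict.keys_insert_of_not_contains _ _ (by simpa using hco)]
        refine List.Nodup.append hnd (List.nodup_singleton _) ?_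
        intro a ha hb
        rw [List.mem_singleton] at hb
        subst hb
        rw [PySem.Dict.contains_eq_decide_mem_keys] at hco
        simp at hco
        exact hco ha
    · intro k
      rw [PySem.Dict.getD_modify, PySem.Dict.getD_modify]
      split
      · next heq => subst heq; rw [hres p.1, pvDedup_append, if_neg hc]
      · exact hres k
    · intro k
      rw [PySem.Dict.getD_insert, PySem.Dict.getD_modify]
      split
      · next heq => subst heq; rw [pvDedup_append, if_neg hc]
      · exact hseen k

lemma pvFold_inv (ps : List (String × String)) :
    ∀ dA res seen, pvInv dA res seen →
      pvInv (ps.foldl pvStepA dA) (ps.foldl pvStepB (res, seen)).1 (ps.foldl pvStepB (res, seen)).2 := by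
  induction ps with
  | nil => intro dA res seen h; exact h
  | cons p ps ih =>
    intro dA res seen h
    simp only [List.foldl_cons]
    have := pvStep_inv dA res seen p h
    simpa using ih _ _ _ this

lemma pvInv_init : pvInv PySem.Dict.empty PySem.Dict.empty PySem.Dict.empty := by
  refine ⟨rfl, by simp [PySem.Dict.keys_empty], ?_, ?_⟩ <;>
    intro k <;> simp [PySem.Dict.getD_empty, pvDedup, PySem.Set.empty]

-- head of dropWhile fails the predicate
lemma pv_dropWhile_shape (p : Char → Bool) (l : List Char) :
    l.dropWhile p = [] ∨ ∃ c u, l.dropWhile p = c :: u ∧ p c = false := by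
  induction l with
  | nil => exact Or.inl rfl
  | cons c l ih =>
    by_cases hc : p c = true
    · simpa [hc] using ih
    · exact Or.inr ⟨c, l, by simp [hc], by simpa using hc⟩

lemma pv_chars_strip_strip (l : List Char) :
    PySem.Chars.strip (PySem.Chars.strip l) = PySem.Chars.strip l := by
  simp only [PySem.Chars.strip, PySem.Chars.lstrip, PySem.Chars.rstrip]
  set t := l.dropWhile PySem.Chars.isspace with ht
  -- r := rstrip t is a prefix of t, so its head (if any) is t's head, which is not a space
  set r := (t.reverse.dropWhile PySem.Chars.isspace).reverse with hr
  have hpre : r <+: t := by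
    rw [hr]
    conv_rhs => rw [← List.reverse_reverse t]
    exact List.reverse_prefix.mpr (List.dropWhile_suffix _)
  have hdrop : r.dropWhile PySem.Chars.isspace = r := by
    rcases pv_dropWhile_shape PySem.Chars.isspace l with h0 | ⟨c, u, hcu, hcF⟩
    · rw [← ht] at h0
      have : r = [] := by rw [hr, h0]; simp
      rw [this]; simp
    · rw [← ht] at hcu
      cases hre : r with
      | nil => simp
      | cons d v =>
        have : d = c := by
          obtain ⟨ts, hts⟩ := hpre
          rw [hre] at hts
          rw [hcu] at hts
          simpa using congrArg List.head? hts
        subst this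
        simp [hcF]
  calc ((r.dropWhile PySem.Chars.isspace).reverse.dropWhile PySem.Chars.isspace).reverse
      = (r.reverse.dropWhile PySem.Chars.isspace).reverse := by rw [hdrop]
    _ = r := by
        rw [hr]
        simp [List.dropWhile_idempotent]

lemma pv_strip_strip (s : String) : PySem.Str.strip (PySem.Str.strip s) = PySem.Str.strip s := by
  simp [PySem.Str.strip, pv_chars_strip_strip]

lemma pvParseLine_snd {raw : String} {p : String × String} (h : pvParseLine raw = some p) :
    p.2 ≠ "" ∧ PySem.Str.strip p.2 = p.2 := by
  unfold pvParseLine at h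
  dsimp only at h
  split at h
  · exact absurd h (by simp)
  · split at h
    · split at h
      · exact absurd h (by simp)
      · next hne =>
        injection h with h2
        subst h2
        simp only [Bool.or_eq_true, beq_iff_eq, not_or] at hne
        exact ⟨hne.2, pv_strip_strip _⟩
    · exact absurd h (by simp)

lemma pvNormalize_eq_dedup (vs : List String)
    (h : ∀ v ∈ vs, v ≠ "" ∧ PySem.Str.strip v = v) :
    pvNormalizeAttrValues vs = (pvDedup vs).1 := by
  unfold pvNormalizeAttrValues pvDedup
  congr 1
  apply PySem.List.foldl_congr_mem
  intro st v hv
  obtain ⟨hne, hst⟩ := h v hv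
  dsimp only
  rw [hst]
  have : (v == "") = false := by simpa using hne
  rw [this]
  simp

theorem pv_main (output : String) :
    parse_bloodyad_multi_value_output_py output = parse_bloodyad_multi_value_output_py_alt output := by
  rw [pvA_fold_eq, pvB_fold_eq]
  set ps := (PySem.Str.splitlines output).filterMap pvParseLine with hps
  obtain ⟨hk, hnd, hres, -⟩ := pvFold_inv ps PySem.Dict.empty PySem.Dict.empty PySem.Dict.empty pvInv_init
  set dA := ps.foldl pvStepA PySem.Dict.empty with hdA
  set res := (ps.foldl pvStepB (PySem.Dict.empty, PySem.Dict.empty)).1 with hresd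
  have hndA : dA.keys.Nodup := hk ▸ hnd
  rw [PySem.Dict.items_eq_map_keys dA hndA [], PySem.Dict.items_eq_map_keys res hnd [], hk,
      List.map_map]
  apply List.map_congr_left
  intro k _
  simp only [Function.comp]
  congr 1
  rw [hres k]
  apply pvNormalize_eq_dedup
  intro v hv
  have hvps : ∃ q ∈ ps, q.2 = v := by
    have : dA.getD k [] = (ps.filter (fun p => p.1 == k)).map (fun p => p.2) := by
      rw [hdA]
      have := PySem.Dict.getD_foldl_modify_append (l := ps) (d := PySem.Dict.empty) (c := k)
      simpa [pvStepA, PySem.Dict.getD_empty] using this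
    rw [this] at hv
    obtain ⟨q, hq, hq2⟩ := List.mem_map.mp hv
    exact ⟨q, List.mem_of_mem_filter hq, hq2⟩
  obtain ⟨q, hq, hq2⟩ := hvps
  obtain ⟨raw, -, hraw⟩ := List.mem_filterMap.mp (hps ▸ hq)
  have := pvParseLine_snd hraw
  rw [hq2] at this
  exact this

-- ===== VERDICT (by name: the statement is the Claim_ definition above) =====
theorem parse_bloodyad_multi_value_output_py_spec : Claim_equal_parse_bloodyad_multi_value_output_py := by
  intro output _
  unfold Spec_parse_bloodyad_multi_value_output_py
  exact pv_main output
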